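-- pv_equiv track=rewrite | github.com/dariushjj/program_in_micorsoft | pipeline_test/utils.py | get_relative_url
-- ===== SOURCE A (Python) =====
-- def get_relative_url(url):
--     if url[:4] == 'http':
--         count_slash = 0
--         result = ""
--         for i, letter in enumerate(url):
--             if letter == '/':
--                 if count_slash < 2:
--                     count_slash += 1
--                 else:
--                     result = url[i + 1:]
--                     break
--         return result
--     else:
--         return url
-- ===== SOURCE B (Python) =====
-- def get_relative_url(url):
--     if not url.startswith('http'):
--         return url
--     parts = url.split('/', 3)
--     return parts[3] if len(parts) == 4 else ''
-- ===== Notes on version B (the rewrite author's own statement) =====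
-- stated objective: idiomatic
-- what changed: B replaces A's character-by-character scan with a slash counter and break by splitting the URL at the first three slashes (str.split with maxsplit) and indexing the fourth piece.
import Mathlib
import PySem

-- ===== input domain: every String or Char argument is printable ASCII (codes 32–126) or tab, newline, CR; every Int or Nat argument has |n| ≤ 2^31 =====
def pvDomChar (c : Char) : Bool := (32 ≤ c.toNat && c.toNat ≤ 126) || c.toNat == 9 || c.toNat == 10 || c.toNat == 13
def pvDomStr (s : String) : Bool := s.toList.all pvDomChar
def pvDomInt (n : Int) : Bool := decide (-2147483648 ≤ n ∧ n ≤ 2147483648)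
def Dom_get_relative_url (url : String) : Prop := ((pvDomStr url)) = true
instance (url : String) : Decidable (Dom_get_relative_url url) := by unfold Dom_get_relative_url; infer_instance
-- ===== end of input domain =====

-- B partitions the URL with split('/', 3) and indexes the fourth piece instead of A's
-- character scan with a slash counter (objective: idiomatic; return values are identical).

-- ===== PORT A =====
-- A's for-loop over enumerate(url) with the slash counter and the break; `url` is the
-- whole string (for the slice url[i+1:]), the second list argument the not-yet-scanned
-- suffix, `i` the current index, `count` the slash counter; returning [] is result = "".
def pvLoopA (url : List Char) : List Char → Nat → Nat → List Char
  | [], _, _ => []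
  | c :: rest, i, count =>
    if c = '/' then
      if count < 2 then pvLoopA url rest (i + 1) (count + 1)
      else PySem.List.slice url (some ((i : Int) + 1)) none
    else pvLoopA url rest (i + 1) count

def get_relative_url (url : String) : String :=
  if PySem.Str.slice url none (some 4) = "http" then
    String.ofList (pvLoopA url.toList url.toList 0 0)
  else url

-- ===== PORT B =====
def get_relative_url_alt (url : String) : String :=
  if ¬ PySem.Str.startswith url "http" then url
  else
    let parts := (PySem.Str.splitMax? url "/" 3).getD []
    if parts.length = 4 then PySem.List.pyGetD parts 3 "" else ""

-- ===== PRECONDITION & SPEC =====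
def Spec_get_relative_url (url : String) (out : String) : Prop := out = get_relative_url_alt url
instance (url : String) (out : String) : Decidable (Spec_get_relative_url url out) := by unfold Spec_get_relative_url; infer_instance

-- ===== CLAIM (what is proved, stated in full; the proofs are below) =====
def Claim_equal_get_relative_url : Prop := ∀ (url : String), Dom_get_relative_url url → Spec_get_relative_url url (get_relative_url url)

-- ===== LEMMAS AND PROOFS =====

-- suffix after the m-th '/' (0-indexed: afterN 2 = after the third slash), none if absent
def pvAfterN : Nat → List Char → Option (List Char)
  | _, [] => none
  | m, c :: rest => if c = '/' then (if m = 0 then some rest else pvAfterN (m - 1) rest) else pvAfterN m rest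

-- fuel-free form of PySem.Chars.splitOnMax.go for sep = "/" with empty accumulator
def pvGos : Nat → List Char → List Char → List (List Char)
  | 0, l, cur => [cur.reverse ++ l]
  | _ + 1, [], cur => [cur.reverse]
  | m + 1, c :: rest, cur =>
    if c = '/' then cur.reverse :: pvGos m rest [] else pvGos (m + 1) rest (c :: cur)

theorem pvGo_spec (l : List Char) : ∀ (fuel m : Nat) (cur : List Char) (acc : List (List Char)),
    l.length ≤ fuel →
    PySem.Chars.splitOnMax.go ['/'] fuel m l cur acc = acc.reverse ++ pvGos m l cur := by
  induction l with
  | nil =>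
    intro fuel m cur acc _
    rw [PySem.Chars.splitOnMax.go.eq_def]
    cases fuel <;> cases m <;> simp [pvGos]
  | cons c rest ih =>
    intro fuel m cur acc hf
    cases fuel with
    | zero => simp at hf
    | succ fuel =>
      rw [PySem.Chars.splitOnMax.go.eq_def]
      cases m with
      | zero => simp [pvGos]
      | succ m =>
        simp only [Nat.succ_ne_zero, if_false]
        by_cases hc : c = '/'
        · subst hc
          have hpf : (['/'] : List Char).isPrefixOf ('/' :: rest) = true := by
            simp [List.isPrefixOf]
          rw [if_pos hpf]
          have hm : m + 1 - 1 = m := by omega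
          have hd : List.drop (['/'] : List Char).length ('/' :: rest) = rest := by simp
          rw [hm, hd, ih fuel m [] (cur.reverse :: acc) (by simpa using Nat.le_of_succ_le_succ hf)]
          simp [pvGos]
        · have hp : (['/'].isPrefixOf (c :: rest)) = false := by
            simp [List.isPrefixOf]; exact fun h => absurd h.symm hc
          simp only [hp, Bool.false_eq_true, if_false]
          rw [ih fuel (m + 1) (c :: cur) acc (by simpa using Nat.le_of_succ_le_succ hf)]
          simp [pvGos, hc]

theorem pvGos_afterN : ∀ (l : List Char) (m : Nat) (cur : List Char),
    (pvAfterN m l = none → (pvGos (m + 1) l cur).length ≤ m + 1) ∧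
    (∀ t, pvAfterN m l = some t →
      ∃ pre, pvGos (m + 1) l cur = pre ++ [t] ∧ pre.length = m + 1) := by
  intro l
  induction l with
  | nil => intro m cur; simp [pvAfterN, pvGos]
  | cons c rest ih =>
    intro m cur
    by_cases hc : c = '/'
    · subst hc
      cases m with
      | zero =>
        constructor
        · intro h; simp [pvAfterN] at h
        · intro t ht
          simp [pvAfterN] at ht
          subst ht
          exact ⟨[cur.reverse], by simp [pvGos]⟩
      | succ m =>
        constructor
        · intro h
          simp [pvAfterN] at h
          have := (ih m []).1 h
          simp [pvGos]
          omega
        · intro t ht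
          simp [pvAfterN] at ht
          obtain ⟨pre, hpre, hlen⟩ := (ih m []).2 t ht
          exact ⟨cur.reverse :: pre, by simp [pvGos, hpre], by simp [hlen]⟩
    · constructor
      · intro h
        simp [pvAfterN, hc] at h
        simpa [pvGos, hc] using (ih m (c :: cur)).1 h
      · intro t ht
        simp [pvAfterN, hc] at ht
        obtain ⟨pre, hpre, hlen⟩ := (ih m (c :: cur)).2 t ht
        exact ⟨pre, by simp [pvGos, hc, hpre], hlen⟩

theorem pvLoopA_afterN (url : List Char) : ∀ (l : List Char) (i count : Nat),
    url.drop i = l → count ≤ 2 →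
    pvLoopA url l i count = (pvAfterN (2 - count) l).getD [] := by
  intro l
  induction l with
  | nil => intro i count _ _; simp [pvLoopA, pvAfterN]
  | cons c rest ih =>
    intro i count hdrop hcount
    have hrest : url.drop (i + 1) = rest := by
      have : url.drop (i + 1) = (url.drop i).drop 1 := by
        rw [List.drop_drop]
      rw [this, hdrop]; rfl
    by_cases hc : c = '/'
    · subst hc
      by_cases hlt : count < 2
      · have h2 : 2 - count ≠ 0 := by omega
        rw [pvLoopA, if_pos rfl, if_pos hlt, ih (i + 1) (count + 1) hrest (by omega)]
        have h3 : 2 - (count + 1) = 2 - count - 1 := by omega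
        rw [h3]
        simp [pvAfterN, h2]
      · have hc2 : count = 2 := by omega
        subst hc2
        rw [pvLoopA, if_pos rfl, if_neg hlt]
        have : PySem.List.slice url (some ((i : Int) + 1)) none = url.drop (i + 1) := by
          have := PySem.List.slice_from_natCast url (i + 1)
          push_cast at this ⊢
          exact this
        rw [this, hrest]
        simp [pvAfterN]
    · rw [pvLoopA, if_neg hc, ih (i + 1) count hrest hcount]
      simp [pvAfterN, hc]

-- A's prefix test url[:4] == 'http' agrees with B's startswith
theorem pvGuard (url : String) :
    (PySem.Str.slice url none (some 4) = "http") ↔ (PySem.Str.startswith url "http" = true) := by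
  rw [PySem.Str.startswith_eq, PySem.Chars.startswith_iff]
  constructor
  · intro h
    have hl : (PySem.Str.slice url none (some 4)).toList = "http".toList := by rw [h]
    rw [PySem.Str.toList_slice] at hl
    have : PySem.Chars.slice url.toList none (some 4) = url.toList.take 4 := by
      simpa using PySem.List.slice_to_natCast (b := 4) (xs := url.toList)
    rw [this] at hl
    rw [← hl]
    exact List.take_prefix _ _
  · intro h
    obtain ⟨t, ht⟩ := h
    have h4 : PySem.Chars.slice url.toList none (some 4) = "http".toList := by
      have : PySem.Chars.slice url.toList none (some 4) = url.toList.take 4 := by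
        simpa using PySem.List.slice_to_natCast (b := 4) (xs := url.toList)
      rw [this, ← ht]
      simp
    have : (PySem.Str.slice url none (some 4)).toList = "http".toList := by
      rw [PySem.Str.toList_slice]; exact h4
    exact String.toList_injective this

-- ===== VERDICT (by name: the statement is the Claim_ definition above) =====
theorem get_relative_url_spec : Claim_equal_get_relative_url := by
  intro url _
  unfold Spec_get_relative_url get_relative_url get_relative_url_alt
  by_cases hg : PySem.Str.slice url none (some 4) = "http"
  · have hb : PySem.Str.startswith url "http" = true := (pvGuard url).mp hg
    rw [if_pos hg, hb, if_neg (by simp)]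
    have hgos : PySem.Chars.splitOnMax url.toList ['/'] 3 = pvGos 3 url.toList [] := by
      unfold PySem.Chars.splitOnMax
      rw [if_neg (by norm_num)]
      have := pvGo_spec url.toList (url.toList.length + 1) 3 [] [] (by omega)
      simpa using this
    have hparts : (PySem.Str.splitMax? url "/" 3).getD []
        = List.map String.ofList (pvGos 3 url.toList []) := by
      simp [PySem.Str.splitMax?, PySem.Chars.splitMax?, hgos]
    have hloop : pvLoopA url.toList url.toList 0 0 = (pvAfterN 2 url.toList).getD [] :=
      pvLoopA_afterN url.toList url.toList 0 0 (by simp) (by omega)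
    rw [hparts, hloop]
    cases ha : pvAfterN 2 url.toList with
    | none =>
      have hlen : (pvGos 3 url.toList []).length ≤ 3 := (pvGos_afterN url.toList 2 []).1 ha
      rw [if_neg (by simp; omega)]
      simp
    | some t =>
      obtain ⟨pre, hpre, hplen⟩ := (pvGos_afterN url.toList 2 []).2 t ha
      have hlen4 : (List.map String.ofList (pvGos 3 url.toList [])).length = 4 := by
        simp [hpre, hplen]
      rw [if_pos hlen4]
      have h3 : (3 : Int) = ((3 : Nat) : Int) := by norm_num
      rw [h3, PySem.List.pyGetD_ofNat _ 3 _ (by omega)]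
      simp only [Option.getD_some, hpre, List.map_append, List.map_cons, List.map_nil]
      rw [List.getElem_append_right (by simp [hplen])]
      simp [hplen]
  · have hb : PySem.Str.startswith url "http" = false := by
      by_contra h
      exact hg ((pvGuard url).mpr (by simpa using h))
    rw [if_neg hg, hb]
    simp
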